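-- pv_equiv track=rewrite | github.com/UdeS-CoBIUS/SpliceFamAlignMulti | src_tcoffee/generate_segment_matches.py | add_genesegment
-- ===== SOURCE A (Python) =====
-- def add_genesegment(genesegment, geneid, exon):
--     if(geneid in (genesegment.keys())):
--         overlap = []
--         for i in range(len(genesegment[geneid])):
--             segment = genesegment[geneid][i]
--             if(segment[1] > exon[0] and exon[1] > segment[0]):
--                 overlap.append(segment)
--         if(len(overlap) == 0):
--             genesegment[geneid].append(exon)
--         else:
--             segment = [min([x[0] for x in overlap]+[exon[0]]), max([x[1] for x in overlap]+[exon[1]])]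
--             for s in overlap:
--                 genesegment[geneid].remove(s)
--             genesegment[geneid].append(segment)
--     else:
--         genesegment[geneid] = [exon]
--     genesegment[geneid] = sorted(genesegment[geneid])
--     return genesegment
-- ===== SOURCE B (Python) =====
-- # Same return value as A; like A it updates the dict entry in place (the per-gene
-- # list object is replaced, as A's final reassignment also does).
-- import bisect
--
-- def add_genesegment(genesegment, geneid, exon):
--     if geneid not in genesegment:
--         genesegment[geneid] = [exon]
--         return genesegment
--     keep = []
--     bounds = None  # running (lo, hi) of the merged block, seeded from exon
--     for seg in genesegment[geneid]:
--         if seg[1] > exon[0] and exon[1] > seg[0]: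
--             if bounds is None:
--                 bounds = (min(seg[0], exon[0]), max(seg[1], exon[1]))
--             else:
--                 bounds = (min(seg[0], bounds[0]), max(seg[1], bounds[1]))
--         else:
--             keep.append(seg)
--     merged = exon if bounds is None else [bounds[0], bounds[1]]
--     keep.sort()
--     bisect.insort(keep, merged)
--     genesegment[geneid] = keep
--     return genesegment
-- ===== Notes on version B (the rewrite author's own statement) =====
-- stated objective: alternative
-- what changed: B replaces A's three passes (build an overlap list, call list.remove once per overlapping segment, re-sort the whole merged list) by one partitioning pass that keeps a running (lo,hi) bound of the overlapped block, then sorts only the kept segments and bisect-inserts the merged segment.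
import Mathlib
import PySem

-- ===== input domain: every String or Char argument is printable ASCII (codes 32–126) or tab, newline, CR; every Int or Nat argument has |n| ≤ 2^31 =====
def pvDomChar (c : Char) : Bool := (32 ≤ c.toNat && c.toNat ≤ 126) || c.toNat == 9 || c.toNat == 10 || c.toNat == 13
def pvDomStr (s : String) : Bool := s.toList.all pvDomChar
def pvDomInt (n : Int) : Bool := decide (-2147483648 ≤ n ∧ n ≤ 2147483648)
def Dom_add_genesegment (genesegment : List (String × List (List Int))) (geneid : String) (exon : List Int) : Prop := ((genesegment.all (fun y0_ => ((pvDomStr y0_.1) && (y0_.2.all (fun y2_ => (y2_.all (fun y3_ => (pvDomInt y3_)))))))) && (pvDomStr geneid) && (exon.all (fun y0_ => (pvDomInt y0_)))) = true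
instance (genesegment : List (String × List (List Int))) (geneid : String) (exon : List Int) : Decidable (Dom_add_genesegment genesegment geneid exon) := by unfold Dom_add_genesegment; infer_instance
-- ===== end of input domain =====

-- B replaces A's overlap list + repeated list.remove + full re-sort by a single
-- partitioning pass with a running (lo, hi) bound, sorting only the kept segments
-- and bisect-inserting the merged segment.  Equivalence is about the RETURN value;
-- both Pythons also rebind genesegment[geneid] in place.

-- ===== PORT A =====
-- pyGetD with default 0/[] is exact here: Pre_ guarantees every index A evaluates is in range.
def add_genesegment (genesegment : List (String × List (List Int))) (geneid : String) (exon : List Int) : List (String × List (List Int)) :=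
  let d := PySem.Dict.mk genesegment
  if PySem.Dict.contains d geneid then
    let cur := (PySem.Dict.get? d geneid).getD []
    -- for i in range(len(genesegment[geneid])): segment = ...[i]; if overlap: overlap.append(segment)
    let overlap := (PySem.List.pyRange 0 (PySem.List.len cur) 1).foldl
      (fun acc i =>
        let segment := PySem.List.pyGetD cur i []
        if PySem.List.pyGetD segment 1 0 > PySem.List.pyGetD exon 0 0 ∧
           PySem.List.pyGetD exon 1 0 > PySem.List.pyGetD segment 0 0
        then acc ++ [segment] else acc) []
    let newlist :=
      if overlap.length = 0 then cur ++ [exon]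
      else
        let segment := [(PySem.List.min? (overlap.map (fun x => PySem.List.pyGetD x 0 0) ++ [PySem.List.pyGetD exon 0 0]) (fun y => y)).getD 0,
                        (PySem.List.max? (overlap.map (fun x => PySem.List.pyGetD x 1 0) ++ [PySem.List.pyGetD exon 1 0]) (fun y => y)).getD 0]
        (overlap.foldl (fun acc s => (PySem.List.remove? acc s).getD acc) cur) ++ [segment]
    (PySem.Dict.insert d geneid (PySem.List.sorted newlist (fun x => x) false)).items
  else
    (PySem.Dict.insert d geneid (PySem.List.sorted [exon] (fun x => x) false)).items

-- ===== PORT B =====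
-- bisect.insort_right on a list of List Int (Python's lexicographic list order = '<' on List Int)
def pvInsort (xs : List (List Int)) (m : List Int) : List (List Int) :=
  match xs with
  | [] => [m]
  | y :: ys => if m < y then m :: y :: ys else y :: pvInsort ys m

def add_genesegment_alt (genesegment : List (String × List (List Int))) (geneid : String) (exon : List Int) : List (String × List (List Int)) :=
  let d := PySem.Dict.mk genesegment
  if PySem.Dict.contains d geneid = false then
    (PySem.Dict.insert d geneid [exon]).items
  else
    let cur := (PySem.Dict.get? d geneid).getD []
    -- one pass: partition into kept segments + running (lo, hi) of the overlapped block
    let st := cur.foldl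
      (fun (st : List (List Int) × Option (Int × Int)) seg =>
        if PySem.List.pyGetD seg 1 0 > PySem.List.pyGetD exon 0 0 ∧
           PySem.List.pyGetD exon 1 0 > PySem.List.pyGetD seg 0 0
        then match st.2 with
          | none => (st.1, some (min (PySem.List.pyGetD seg 0 0) (PySem.List.pyGetD exon 0 0),
                                 max (PySem.List.pyGetD seg 1 0) (PySem.List.pyGetD exon 1 0)))
          | some b => (st.1, some (min (PySem.List.pyGetD seg 0 0) b.1,
                                   max (PySem.List.pyGetD seg 1 0) b.2))
        else (st.1 ++ [seg], st.2)) (([] : List (List Int)), (none : Option (Int × Int)))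
    let merged := match st.2 with | none => exon | some b => [b.1, b.2]
    (PySem.Dict.insert d geneid (pvInsort (PySem.List.sorted st.1 (fun x => x) false) merged)).items

-- ===== PRECONDITION & SPEC =====
-- Pre_ excludes exactly the inputs where Python A raises IndexError: geneid already
-- mapped to a NONEMPTY segment list while exon (or some stored segment) has < 2 elements.
def Pre_add_genesegment (genesegment : List (String × List (List Int))) (geneid : String) (exon : List Int) : Prop :=
  ((PySem.Dict.mk genesegment).get? geneid).getD [] = [] ∨
  (2 ≤ exon.length ∧ ∀ s ∈ ((PySem.Dict.mk genesegment).get? geneid).getD [], 2 ≤ s.length)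
instance (genesegment : List (String × List (List Int))) (geneid : String) (exon : List Int) : Decidable (Pre_add_genesegment genesegment geneid exon) := by unfold Pre_add_genesegment; infer_instance
def pvWitness_add_genesegment : (List (String × List (List Int))) × String × List Int :=
  ([("g", [[0, 5], [10, 20]])], "g", [4, 12])

def Spec_add_genesegment (genesegment : List (String × List (List Int))) (geneid : String) (exon : List Int) (out : List (String × List (List Int))) : Prop := out = add_genesegment_alt genesegment geneid exon
instance (genesegment : List (String × List (List Int))) (geneid : String) (exon : List Int) (out : List (String × List (List Int))) : Decidable (Spec_add_genesegment genesegment geneid exon out) := by unfold Spec_add_genesegment; infer_instance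

-- ===== CLAIM (what is proved, stated in full; the proofs are below) =====
def Claim_equal_add_genesegment : Prop := ∀ (genesegment : List (String × List (List Int))) (geneid : String) (exon : List Int), Dom_add_genesegment genesegment geneid exon → Pre_add_genesegment genesegment geneid exon → Spec_add_genesegment genesegment geneid exon (add_genesegment genesegment geneid exon)


-- ===== LEMMAS AND PROOFS =====

-- a foldl that conditionally appends is a filter
theorem pvFilterFold {α : Type} (P : α → Prop) [DecidablePred P] :
    ∀ (xs : List α) (acc : List α),
      xs.foldl (fun acc x => if P x then acc ++ [x] else acc) acc
        = acc ++ xs.filter (fun x => decide (P x)) := by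
  intro xs
  induction xs with
  | nil => intro acc; simp
  | cons x xs ih =>
      intro acc
      by_cases h : P x <;> simp [List.foldl_cons, h, ih]

-- removing values all different from the head keeps the head
theorem pvRemoveFoldCons {α : Type} [BEq α] [LawfulBEq α] :
    ∀ (vs acc : List α) (c : α), (∀ v ∈ vs, v ≠ c) →
      vs.foldl (fun acc s => (PySem.List.remove? acc s).getD acc) (c :: acc)
        = c :: vs.foldl (fun acc s => (PySem.List.remove? acc s).getD acc) acc := by
  intro vs
  induction vs with
  | nil => intro acc c _; rfl
  | cons v vs ih =>
      intro acc c h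
      have hvc : c ≠ v := fun e => h v (by simp) e.symm
      have hstep : (PySem.List.remove? (c :: acc) v).getD (c :: acc)
          = c :: (PySem.List.remove? acc v).getD acc := by
        rw [PySem.List.remove?_cons_of_ne acc hvc]
        cases PySem.List.remove? acc v <;> rfl
      simp only [List.foldl_cons, hstep]
      exact ih _ c (fun w hw => h w (by simp [hw]))

-- A's removal loop: removing exactly the P-elements leaves the not-P-elements in order
theorem pvRemoveFold {α : Type} [BEq α] [LawfulBEq α] (P : α → Prop) [DecidablePred P] :
    ∀ (cur : List α),
      (cur.filter (fun s => decide (P s))).foldl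
          (fun acc s => (PySem.List.remove? acc s).getD acc) cur
        = cur.filter (fun s => !decide (P s)) := by
  intro cur
  induction cur with
  | nil => rfl
  | cons c cur ih =>
      by_cases h : P c
      · simp only [List.filter_cons, h, decide_true, if_pos, List.foldl_cons,
          PySem.List.remove?_cons_self, Option.getD_some]
        simpa [List.filter_cons, h] using ih
      · have hmem : ∀ v ∈ cur.filter (fun s => decide (P s)), v ≠ c := by
          intro v hv e
          exact h (e ▸ (by simpa using (List.mem_filter.mp hv).2))
        simp only [List.filter_cons, h, decide_false, if_neg, Bool.false_eq_true,
          not_false_iff, Bool.not_false]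
        rw [pvRemoveFoldCons _ _ _ hmem, ih]
        simp

-- folding the running-(lo,hi) update from a seeded bound = componentwise running min/max
theorem pvBoundsFold {α : Type} (f0 f1 : α → Int) (e0 e1 : Int) :
    ∀ (t : List α) (lo hi : Int),
      t.foldl (fun (b : Option (Int × Int)) s =>
          match b with
          | none => some (min (f0 s) e0, max (f1 s) e1)
          | some b => some (min (f0 s) b.1, max (f1 s) b.2)) (some (lo, hi))
        = some (t.foldl (fun a s => min (f0 s) a) lo, t.foldl (fun a s => max (f1 s) a) hi) := by
  intro t
  induction t with
  | nil => intro lo hi; rfl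
  | cons s t ih => intro lo hi; simp only [List.foldl_cons]; exact ih _ _

theorem pvMinFold {α : Type} (f0 : α → Int) :
    ∀ (t : List α) (a b : Int),
      t.foldl (fun acc s => min (f0 s) acc) (min a b)
        = min ((t.map f0).foldl min a) b := by
  intro t
  induction t with
  | nil => intro a b; rfl
  | cons s t ih =>
      intro a b
      simp only [List.foldl_cons, List.map_cons]
      rw [show min (f0 s) (min a b) = min (min a (f0 s)) b by
        rw [min_comm a (f0 s), min_assoc], ih]

theorem pvMaxFold {α : Type} (f1 : α → Int) :
    ∀ (t : List α) (a b : Int),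
      t.foldl (fun acc s => max (f1 s) acc) (max a b)
        = max ((t.map f1).foldl max a) b := by
  intro t
  induction t with
  | nil => intro a b; rfl
  | cons s t ih =>
      intro a b
      simp only [List.foldl_cons, List.map_cons]
      rw [show max (f1 s) (max a b) = max (max a (f1 s)) b by
        rw [max_comm a (f1 s), max_assoc], ih]

-- bisect.insort_right is PySem's insertBy with the strict order
theorem pvInsortBy : ∀ (xs : List (List Int)) (m : List Int),
    PySem.List.insertBy (fun a b => decide (a < b)) m xs = pvInsort xs m := by
  intro xs m
  induction xs with
  | nil => rfl
  | cons y ys ih =>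
      by_cases h : m < y <;> simp [PySem.List.insertBy, pvInsort, h, ih]

-- sorting with one extra element appended = insort into the sorted rest (stability)
theorem pvSortedAppend (ks : List (List Int)) (m : List Int) :
    PySem.List.sorted (ks ++ [m]) (fun x => x) false
      = pvInsort (PySem.List.sorted ks (fun x => x) false) m := by
  rw [PySem.List.sorted_eq_foldl_insertBy, PySem.List.sorted_eq_foldl_insertBy,
    List.foldl_append]
  simp only [List.foldl_cons, List.foldl_nil]
  exact pvInsortBy _ m

-- ===== VERDICT (by name: the statement is the Claim_ definition above) =====
theorem add_genesegment_spec : Claim_equal_add_genesegment := by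
  intro g geneid exon _ _
  unfold Spec_add_genesegment add_genesegment add_genesegment_alt
  by_cases hc : PySem.Dict.contains (PySem.Dict.mk g) geneid = true
  · simp only [hc, if_true, Bool.true_eq_false, if_false]
    set cur := ((PySem.Dict.mk g).get? geneid).getD [] with hcur
    set P : List Int → Prop := fun segment =>
      PySem.List.pyGetD segment 1 0 > PySem.List.pyGetD exon 0 0 ∧
      PySem.List.pyGetD exon 1 0 > PySem.List.pyGetD segment 0 0 with hP
    -- A's index loop over range(len(cur)) is a fold over cur
    rw [PySem.List.len_eq,
      PySem.List.foldl_pyRange_zero_pyGetD' cur []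
        (fun acc segment => if P segment then acc ++ [segment] else acc) [],
      pvFilterFold P cur [], List.nil_append]
    -- B's single pass = (kept segments, folded bounds over the overlap)
    have hB : ∀ (l : List (List Int)) (k0 : List (List Int)) (b0 : Option (Int × Int)),
        l.foldl (fun (st : List (List Int) × Option (Int × Int)) seg =>
          if P seg
          then match st.2 with
            | none => (st.1, some (min (PySem.List.pyGetD seg 0 0) (PySem.List.pyGetD exon 0 0),
                                   max (PySem.List.pyGetD seg 1 0) (PySem.List.pyGetD exon 1 0)))
            | some b => (st.1, some (min (PySem.List.pyGetD seg 0 0) b.1,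
                                     max (PySem.List.pyGetD seg 1 0) b.2))
          else (st.1 ++ [seg], st.2)) (k0, b0)
        = (k0 ++ l.filter (fun s => !decide (P s)),
           (l.filter (fun s => decide (P s))).foldl (fun (b : Option (Int × Int)) s =>
              match b with
              | none => some (min (PySem.List.pyGetD s 0 0) (PySem.List.pyGetD exon 0 0),
                              max (PySem.List.pyGetD s 1 0) (PySem.List.pyGetD exon 1 0))
              | some b => some (min (PySem.List.pyGetD s 0 0) b.1,
                                max (PySem.List.pyGetD s 1 0) b.2)) b0) := by
      intro l
      induction l with
      | nil => intro k0 b0; simp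
      | cons s l ih =>
          intro k0 b0
          by_cases h : P s
          · simp only [List.foldl_cons, List.filter_cons, h, if_pos, decide_true,
              Bool.not_true, Bool.false_eq_true, if_neg, not_false_iff]
            cases b0 <;> simp [ih]
          · simp only [List.foldl_cons, List.filter_cons, h, if_neg, decide_false,
              Bool.not_false, if_pos, not_false_iff]
            rw [ih, List.append_assoc]
            rfl
    rw [hB cur [] none, List.nil_append, pvRemoveFold P cur]
    rcases hov : cur.filter (fun s => decide (P s)) with _ | ⟨x, t⟩
    · -- no overlapping segment: A appends exon, B insorts it into the kept (= all) segments
      have hkeep : cur.filter (fun s => !decide (P s)) = cur := by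
        apply List.filter_eq_self.mpr
        intro a ha
        have : a ∉ cur.filter (fun s => decide (P s)) := by rw [hov]; simp
        simp only [List.mem_filter, ha, true_and] at this
        simpa using this
      simp only [List.length_nil, List.foldl_nil, hkeep]
      rw [if_pos trivial, pvSortedAppend]
    · -- merge: A's min/max comprehensions = B's running bounds
      have hlen : ¬ ((x :: t).length = 0) := by simp
      rw [if_neg hlen]
      simp only [List.map_cons, List.foldl_cons, List.cons_append]
      rw [PySem.List.min?_id_cons, PySem.List.max?_id_cons]
      simp only [Option.getD_some, List.foldl_append, List.foldl_cons, List.foldl_nil]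
      rw [pvBoundsFold (fun s => PySem.List.pyGetD s 0 0) (fun s => PySem.List.pyGetD s 1 0)
        (PySem.List.pyGetD exon 0 0) (PySem.List.pyGetD exon 1 0) t]
      rw [← pvMinFold (fun s => PySem.List.pyGetD s 0 0) t (PySem.List.pyGetD x 0 0) (PySem.List.pyGetD exon 0 0)]
      rw [← pvMaxFold (fun s => PySem.List.pyGetD s 1 0) t (PySem.List.pyGetD x 1 0) (PySem.List.pyGetD exon 1 0)]
      rw [pvSortedAppend]
  · simp only [Bool.not_eq_true] at hc
    simp [hc]
    rfl
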